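-- pv_equiv track=rewrite | github.com/Phyisis/Problems | src/helpers/helpers/polynomial_tools.py | signChange
-- ===== SOURCE A (Python) =====
-- def signChange(myList):
--     numList = myList[::]  # make a copy of the list of coefficients (don't overwrite myList).
--
--     # Get rid of initial zeros.
--     while numList and numList[0]==0:  # pop off elements as long as the list isn't empty and starts with 0.
--         numList.pop(0)
--
--     s = 0  # no sign changes yet.
--     if numList:  # if the list isn't empty...
--         cs = 1 if numList[0]>0 else -1  # cs = 1 for a first positive entry and -1 for negative.
--         numList.pop(0)  # Pop off the first element
--         while numList:  # Loop while there's more in the list.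
--             # tmp = 1, -1, or the current sign cs according to whether the list begins with a positive, negative, or zero.
--             tmp = 1 if numList[0]>0 else -1 if numList[0]<0 else cs
--             if tmp != cs: # the sign switched
--                 cs = tmp  # change the current sign
--                 s = s+1   # increment the number of sign changes
--             numList.pop(0)  # pop off the first element in the list
--
--     return s
-- ===== SOURCE B (Python) =====
-- def signChange(myList):
--     s = 0
--     cs = 0  # last nonzero sign seen (0 = none yet)
--     for x in myList:
--         if x != 0:
--             t = 1 if x > 0 else -1
--             if cs != 0 and t != cs:
--                 s += 1
--             cs = t
--     return s
-- ===== Notes on version B (the rewrite author's own statement) =====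
-- stated objective: faster
-- what changed: Replaced A's repeated pop(0) on a list copy (each pop is O(n)) by a single forward pass tracking the last nonzero sign.
import Mathlib
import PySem

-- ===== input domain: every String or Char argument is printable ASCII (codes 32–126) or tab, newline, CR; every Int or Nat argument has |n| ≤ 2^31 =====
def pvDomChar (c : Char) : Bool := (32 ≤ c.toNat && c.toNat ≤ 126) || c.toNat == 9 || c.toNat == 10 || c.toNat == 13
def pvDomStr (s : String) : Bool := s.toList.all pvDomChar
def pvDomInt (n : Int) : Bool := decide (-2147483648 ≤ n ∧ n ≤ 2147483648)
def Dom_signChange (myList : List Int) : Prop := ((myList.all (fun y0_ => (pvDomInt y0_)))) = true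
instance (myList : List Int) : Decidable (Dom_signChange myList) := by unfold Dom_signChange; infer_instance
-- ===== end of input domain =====

-- B replaces A's repeated pop(0) loops with one forward pass tracking the last nonzero sign (asymptotically faster).


-- ===== PORT A =====
-- A's first while loop: pop leading zeros
def signChangeDropZeros : List Int → List Int
  | [] => []
  | x :: xs => if x = 0 then signChangeDropZeros xs else x :: xs

-- A's second while loop over (numList, cs, s)
def signChangeLoopA : List Int → Int → Int → Int
  | [], _, s => s
  | x :: xs, cs, s =>
    let tmp : Int := if x > 0 then 1 else if x < 0 then -1 else cs
    if tmp ≠ cs then signChangeLoopA xs tmp (s + 1) else signChangeLoopA xs cs s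

def signChange (myList : List Int) : Int :=
  match signChangeDropZeros myList with
  | [] => 0
  | x :: xs => signChangeLoopA xs (if x > 0 then (1 : Int) else -1) 0

-- ===== PORT B =====
-- B's single for loop over (cs, s); cs = 0 means no nonzero seen yet
def signChangeLoopB : List Int → Int → Int → Int
  | [], _, s => s
  | x :: xs, cs, s =>
    if x ≠ 0 then
      let t : Int := if x > 0 then 1 else -1
      signChangeLoopB xs t (if cs ≠ 0 ∧ t ≠ cs then s + 1 else s)
    else signChangeLoopB xs cs s

def signChange_alt (myList : List Int) : Int := signChangeLoopB myList 0 0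

-- ===== PRECONDITION & SPEC =====
def Spec_signChange (myList : List Int) (out : Int) : Prop := out = signChange_alt myList
instance (myList : List Int) (out : Int) : Decidable (Spec_signChange myList out) := by unfold Spec_signChange; infer_instance

-- ===== CLAIM (what is proved, stated in full; the proofs are below) =====
def Claim_equal_signChange : Prop := ∀ (myList : List Int), Dom_signChange myList → Spec_signChange myList (signChange myList)

-- ===== LEMMAS AND PROOFS =====
-- once cs is a real sign (±1), the two loops coincide
theorem loopA_eq_loopB (xs : List Int) : ∀ (cs s : Int), cs = 1 ∨ cs = -1 →
    signChangeLoopA xs cs s = signChangeLoopB xs cs s := by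
  induction xs with
  | nil => intro cs s _; rfl
  | cons x xs ih =>
    intro cs s hcs
    have hcs0 : cs ≠ 0 := by rcases hcs with h | h <;> simp [h]
    simp only [signChangeLoopA, signChangeLoopB]
    by_cases hx0 : x = 0
    · subst hx0
      norm_num
      exact ih cs s hcs
    · by_cases hpos : x > 0
      · by_cases h1 : (1 : Int) = cs
        · simp only [if_pos hpos, if_pos (hx0 : x ≠ 0), ← h1]
          norm_num
          exact ih 1 s (Or.inl rfl)
        · simp only [if_pos hpos, if_pos (hx0 : x ≠ 0)]
          rw [if_pos (h1 : (1:Int) ≠ cs), if_pos ⟨hcs0, (h1 : (1:Int) ≠ cs)⟩]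
          exact ih 1 (s+1) (Or.inl rfl)
      · have hneg : x < 0 := lt_of_le_of_ne (not_lt.mp hpos) hx0
        by_cases h1 : (-1 : Int) = cs
        · simp only [if_neg hpos, if_pos hneg, if_pos (hx0 : x ≠ 0), ← h1]
          norm_num
          exact ih (-1) s (Or.inr rfl)
        · simp only [if_neg hpos, if_pos hneg, if_pos (hx0 : x ≠ 0)]
          rw [if_pos (h1 : (-1:Int) ≠ cs), if_pos ⟨hcs0, (h1 : (-1:Int) ≠ cs)⟩]
          exact ih (-1) (s+1) (Or.inr rfl)

-- B on the whole list equals A's structure: skip leading zeros, then run with initial sign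
theorem loopB_zero (xs : List Int) : signChangeLoopB xs 0 0 =
    match signChangeDropZeros xs with
    | [] => 0
    | x :: rest => signChangeLoopB rest (if x > 0 then (1:Int) else -1) 0 := by
  induction xs with
  | nil => rfl
  | cons x xs ih =>
    by_cases hx0 : x = 0
    · subst hx0
      simp only [signChangeLoopB, signChangeDropZeros, if_neg (by simp : ¬ ((0:Int) ≠ 0))]
      exact ih
    · simp only [signChangeLoopB, signChangeDropZeros, if_neg hx0, if_pos (hx0 : x ≠ 0)]
      have : ¬ ((0:Int) ≠ 0 ∧ (if x > 0 then (1:Int) else -1) ≠ 0) := by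
        intro h; exact h.1 rfl
      rw [if_neg this]

-- ===== VERDICT (by name: the statement is the Claim_ definition above) =====
theorem signChange_spec : Claim_equal_signChange := by
  intro myList _
  unfold Spec_signChange signChange signChange_alt
  rw [loopB_zero]
  cases h : signChangeDropZeros myList with
  | nil => rfl
  | cons x rest =>
    simp only []
    by_cases hpos : x > 0
    · simp only [if_pos hpos]
      exact loopA_eq_loopB rest 1 0 (Or.inl rfl)
    · simp only [if_neg hpos]
      exact loopA_eq_loopB rest (-1) 0 (Or.inr rfl)
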